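-- pv_equiv track=rewrite | github.com/Contingencyplana/storybook_fun_factory | src/storybook_fun_factory/filename_ai/s1_1_before_the_file_before_the_thread/s1_1_each_line_must_hold_a_voice_a_shape/s1_1_a_verse_is_born_but_cannot_live.py | poetic_line_status
-- ===== SOURCE A (Python) =====
-- def poetic_line_status(poetic_line: str) -> str:
--     if not poetic_line:
--         return "latent"
--
--     forbidden_chars = set('<>:"/\\|?*')
--     poetic_invalid_tokens = ["'", ",", ".", "  "]  # Double spaces, quotes, commas
--
--     if any(char in poetic_line for char in forbidden_chars):
--         return "latent"
--     if any(token in poetic_line for token in poetic_invalid_tokens):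
--         return "latent"
--     if poetic_line != poetic_line.strip():
--         return "latent"
--     if poetic_line.lower() != poetic_line:
--         return "latent"
--
--     return "valid"
-- ===== SOURCE B (Python) =====
-- def poetic_line_status(poetic_line: str) -> str:
--     if not poetic_line:
--         return "latent"
--     if poetic_line[0].isspace() or poetic_line[-1].isspace():
--         return "latent"
--     prev = None
--     for ch in poetic_line:
--         if ch in '<>:"/\\|?*\',.' or ch != ch.lower() or (prev == ' ' and ch == ' '):
--             return "latent"
--         prev = ch
--     return "valid"
-- ===== Notes on version B (the rewrite author's own statement) =====
-- stated objective: alternative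
-- what changed: A's four separate whole-string scans (9 substring searches for forbidden chars, 4 token searches, a strip() comparison, a lower() comparison) are fused into one stateful left-to-right pass carrying the previous character, plus a direct whitespace test on the two end characters.
import Mathlib
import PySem

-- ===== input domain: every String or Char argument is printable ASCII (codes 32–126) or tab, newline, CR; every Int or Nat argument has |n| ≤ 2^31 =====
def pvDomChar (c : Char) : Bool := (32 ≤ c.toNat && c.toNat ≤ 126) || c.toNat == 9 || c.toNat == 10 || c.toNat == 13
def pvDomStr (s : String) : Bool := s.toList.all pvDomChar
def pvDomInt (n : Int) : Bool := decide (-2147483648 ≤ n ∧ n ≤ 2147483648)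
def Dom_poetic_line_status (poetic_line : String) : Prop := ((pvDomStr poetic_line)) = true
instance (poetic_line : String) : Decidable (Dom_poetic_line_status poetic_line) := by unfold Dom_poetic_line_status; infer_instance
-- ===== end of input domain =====

-- B replaces A's four separate whole-string scans by one stateful pass over the characters
-- (plus an end-character whitespace check); alternative decomposition, same asymptotic cost.

-- ===== PORT A =====
def poetic_line_status (poetic_line : String) : String :=
  if poetic_line.toList = [] then "latent"
  else
    let forbidden_chars : PySem.Set Char :=
      PySem.Set.ofList ['<', '>', ':', '"', '/', '\\', '|', '?', '*']
    let poetic_invalid_tokens : List (List Char) := [['\''], [','], ['.'], [' ', ' ']]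
    if forbidden_chars.any (fun c => PySem.Chars.isIn [c] poetic_line.toList) then "latent"
    else if poetic_invalid_tokens.any (fun t => PySem.Chars.isIn t poetic_line.toList) then "latent"
    else if poetic_line.toList ≠ PySem.Chars.strip poetic_line.toList then "latent"
    else if PySem.Chars.lower poetic_line.toList ≠ poetic_line.toList then "latent"
    else "valid"

-- ===== PORT B =====
-- the single pass of Source B: `prev` threads the previous character (none before the first)
def pvAltLoop : Option Char → List Char → String
  | _, [] => "valid"
  | prev, c :: rest =>
    if (['<', '>', ':', '"', '/', '\\', '|', '?', '*', '\'', ',', '.'].contains c)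
        || (c != PySem.Chars.lowerChar c)
        || (prev == some ' ' && c == ' ') then "latent"
    else pvAltLoop (some c) rest

def poetic_line_status_alt (poetic_line : String) : String :=
  match poetic_line.toList with
  | [] => "latent"
  | c :: rest =>
    if PySem.Chars.isspace c || PySem.Chars.isspace ((c :: rest).getLast (by simp))
    then "latent"
    else pvAltLoop none (c :: rest)

-- ===== PRECONDITION & SPEC =====
def Spec_poetic_line_status (poetic_line : String) (out : String) : Prop := out = poetic_line_status_alt poetic_line
instance (poetic_line : String) (out : String) : Decidable (Spec_poetic_line_status poetic_line out) := by unfold Spec_poetic_line_status; infer_instance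

-- ===== CLAIM (what is proved, stated in full; the proofs are below) =====
def Claim_equal_poetic_line_status : Prop := ∀ (poetic_line : String), Dom_poetic_line_status poetic_line → Spec_poetic_line_status poetic_line (poetic_line_status poetic_line)

-- ===== LEMMAS AND PROOFS =====

-- no-double-space invariant of B's loop, isolated from the early-exit structure
def pvNoDbl : Option Char → List Char → Bool
  | _, [] => true
  | prev, c :: rest => !(prev == some ' ' && c == ' ') && pvNoDbl (some c) rest

lemma pvAltLoop_valid_iff (cs : List Char) : ∀ (prev : Option Char),
    pvAltLoop prev cs = "valid" ↔
      (∀ c ∈ cs, ((['<', '>', ':', '"', '/', '\\', '|', '?', '*', '\'', ',', '.'].contains c)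
          || (c != PySem.Chars.lowerChar c)) = false) ∧ pvNoDbl prev cs = true := by
  induction cs with
  | nil => intro prev; simp [pvAltLoop, pvNoDbl]
  | cons c rest ih =>
    intro prev
    simp only [pvAltLoop, pvNoDbl]
    split_ifs with h
    · constructor
      · intro hv; exact absurd hv (by decide)
      · rintro ⟨hall, hdbl⟩
        rcases (Bool.or_eq_true _ _).mp h with h' | h'
        · have hc := hall c (by simp)
          rw [hc] at h'
          exact absurd h' (by decide)
        · simp [h'] at hdbl
    · rw [ih (some c)]
      simp only [Bool.or_eq_true, not_or, Bool.not_eq_true] at h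
      constructor
      · rintro ⟨hall, hdbl⟩
        refine ⟨?_, ?_⟩
        · intro x hx
          rcases List.mem_cons.mp hx with rfl | hx
          · rw [Bool.or_eq_false_iff]; exact ⟨h.1.1, h.1.2⟩
          · exact hall x hx
        · rw [Bool.and_eq_true]; exact ⟨by simp [h.2], hdbl⟩
      · rintro ⟨hall, hpr⟩
        rcases (Bool.and_eq_true _ _).mp hpr with ⟨_, hdbl⟩
        exact ⟨fun x hx => hall x (List.mem_cons_of_mem _ hx), hdbl⟩

lemma pvAltLoop_cases (cs : List Char) : ∀ prev, pvAltLoop prev cs = "valid" ∨ pvAltLoop prev cs = "latent" := by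
  induction cs with
  | nil => intro prev; left; rfl
  | cons c rest ih =>
    intro prev
    simp only [pvAltLoop]
    split_ifs with h
    · right; rfl
    · exact ih (some c)

lemma pvNoDbl_some_iff (cs : List Char) : ∀ (a : Char),
    pvNoDbl (some a) cs = true ↔ ¬ ([' ', ' '] <:+: (a :: cs)) := by
  induction cs with
  | nil =>
    intro a
    constructor
    · intro _ hinf
      have := hinf.length_le
      simp at this
    · intro _; rfl
  | cons c rest ih =>
    intro a
    simp only [pvNoDbl]
    rw [List.infix_cons_iff]
    constructor
    · rintro h
      rcases (Bool.and_eq_true _ _).mp h with ⟨h1, h2⟩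
      rintro (hpre | hinf)
      · rcases List.cons_prefix_cons.mp hpre with ⟨ha, hpre2⟩
        rcases List.cons_prefix_cons.mp hpre2 with ⟨hc, _⟩
        subst ha
        subst hc
        simp at h1
      · exact (ih c).mp h2 hinf
    · intro h
      rw [not_or] at h
      refine (Bool.and_eq_true _ _).mpr ⟨?_, (ih c).mpr h.2⟩
      by_contra hb
      simp only [Bool.not_eq_true, Bool.not_eq_false', Bool.and_eq_true, beq_iff_eq,
        Option.some.injEq] at hb
      rcases hb with ⟨hb1, hb2⟩
      exact h.1 (by
        rw [hb1, hb2]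
        exact List.cons_prefix_cons.mpr ⟨rfl, List.cons_prefix_cons.mpr ⟨rfl, List.nil_prefix⟩⟩)

lemma pvNoDbl_none_iff (cs : List Char) :
    pvNoDbl none cs = true ↔ ¬ ([' ', ' '] <:+: cs) := by
  cases cs with
  | nil =>
    constructor
    · intro _ hinf
      have := hinf.length_le
      simp at this
    · intro _; rfl
  | cons c rest =>
    simp only [pvNoDbl]
    rw [show ((none : Option Char) == some ' ') = false from rfl]
    simp only [Bool.false_and, Bool.not_false, Bool.true_and]
    exact pvNoDbl_some_iff rest c

lemma pvMap_eq_self {f : Char → Char} {l : List Char} :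
    l.map f = l ↔ ∀ c ∈ l, f c = c := by
  induction l with
  | nil => simp
  | cons c rest ih => simp [List.map, ih]

lemma pvStrip_eq_self_iff (c : Char) (rest : List Char) :
    PySem.Chars.strip (c :: rest) = c :: rest ↔
      PySem.Chars.isspace c = false ∧
      PySem.Chars.isspace ((c :: rest).getLast (by simp)) = false := by
  constructor
  · intro h
    have hls : PySem.Chars.lstrip (c :: rest) = c :: rest := by
      have h1 : (PySem.Chars.strip (c :: rest)).length ≤ (PySem.Chars.lstrip (c :: rest)).length := by
        simp only [PySem.Chars.strip, PySem.Chars.rstrip, List.length_reverse]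
        exact le_trans (List.length_dropWhile_le _ _) (by simp)
      have h2 : (PySem.Chars.lstrip (c :: rest)).length ≤ (c :: rest).length :=
        (List.dropWhile_suffix _).length_le
      rw [h] at h1
      exact (List.dropWhile_suffix _).eq_of_length (le_antisymm h2 h1)
    have hhead : PySem.Chars.isspace c = false := by
      have := List.dropWhile_eq_self_iff.mp hls (by simp)
      simpa using this
    have hrs : PySem.Chars.rstrip (c :: rest) = c :: rest := by
      have : PySem.Chars.strip (c :: rest) = PySem.Chars.rstrip (c :: rest) := by
        simp only [PySem.Chars.strip, hls]
      rw [← this, h]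
    have hrev : List.dropWhile PySem.Chars.isspace (c :: rest).reverse = (c :: rest).reverse := by
      have := congrArg List.reverse hrs
      simpa [PySem.Chars.rstrip] using this
    have hlast := List.dropWhile_eq_self_iff.mp hrev (by simp)
    refine ⟨hhead, ?_⟩
    have hg : (c :: rest).reverse[0]'(by simp) = (c :: rest).getLast (by simp) := by
      rw [← List.head_eq_getElem (l := (c :: rest).reverse) (by simp), List.head_reverse]
    rw [hg] at hlast
    simpa using hlast
  · rintro ⟨hhead, hlast⟩
    have hls : PySem.Chars.lstrip (c :: rest) = c :: rest := by
      apply List.dropWhile_eq_self_iff.mpr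
      intro _; simpa using hhead
    have hrs : List.dropWhile PySem.Chars.isspace (c :: rest).reverse = (c :: rest).reverse := by
      apply List.dropWhile_eq_self_iff.mpr
      intro h0
      have hg : (c :: rest).reverse[0]'(by simp) = (c :: rest).getLast (by simp) := by
        rw [← List.head_eq_getElem (l := (c :: rest).reverse) (by simp), List.head_reverse]
      rw [hg]
      simpa using hlast
    simp only [PySem.Chars.strip, hls, PySem.Chars.rstrip, hrs, List.reverse_reverse]

lemma pvNineSubTwelve : ∀ x ∈ (['<', '>', ':', '"', '/', '\\', '|', '?', '*'] : List Char),
    x ∈ (['<', '>', ':', '"', '/', '\\', '|', '?', '*', '\'', ',', '.'] : List Char) := by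
  intro x hx
  simp only [List.mem_cons, List.not_mem_nil, or_false] at hx ⊢
  tauto

lemma pvTwelveSplit : ∀ x ∈ (['<', '>', ':', '"', '/', '\\', '|', '?', '*', '\'', ',', '.'] : List Char),
    x ∈ (['<', '>', ':', '"', '/', '\\', '|', '?', '*'] : List Char) ∨ x = '\'' ∨ x = ',' ∨ x = '.' := by
  intro x hx
  simp only [List.mem_cons, List.not_mem_nil, or_false] at hx ⊢
  tauto

-- ===== VERDICT (by name: the statement is the Claim_ definition above) =====
set_option maxHeartbeats 1000000 in
set_option maxRecDepth 4096 in
theorem poetic_line_status_spec : Claim_equal_poetic_line_status := by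
  intro s _
  unfold Spec_poetic_line_status
  cases hcs : s.toList with
  | nil =>
    simp [poetic_line_status, poetic_line_status_alt, hcs]
  | cons c rest =>
    have hset : (PySem.Set.ofList ['<', '>', ':', '"', '/', '\\', '|', '?', '*'] : PySem.Set Char)
        = ['<', '>', ':', '"', '/', '\\', '|', '?', '*'] := by decide
    have hsingle : ∀ (x : Char) (L : List Char), PySem.Chars.isIn [x] L = true ↔ x ∈ L := fun x L => by
      rw [PySem.Chars.isIn_iff_infix, List.singleton_infix_iff]
    have hvalid := pvAltLoop_valid_iff (c :: rest) none
    rw [pvNoDbl_none_iff] at hvalid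
    have hcases := pvAltLoop_cases (c :: rest) none
    have hstrip := pvStrip_eq_self_iff c rest
    -- a character A flags makes B's loop exit with "latent"
    have hlat_of_bad : ∀ x ∈ c :: rest,
        ((['<', '>', ':', '"', '/', '\\', '|', '?', '*', '\'', ',', '.'] : List Char).contains x = true
          ∨ PySem.Chars.lowerChar x ≠ x) →
        pvAltLoop none (c :: rest) = "latent" := by
      intro x hx hbad
      rcases hcases with hv | hl
      · rcases hvalid.mp hv with ⟨hall, -⟩
        have hx' := hall x hx
        rw [Bool.or_eq_false_iff] at hx'
        rcases hbad with hb | hb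
        · rw [hx'.1] at hb; exact absurd hb (by decide)
        · have h2 := bne_eq_false_iff_eq.mp hx'.2
          exact absurd h2.symm hb
      · exact hl
    have hlat_of_dbl : [' ', ' '] <:+: (c :: rest) → pvAltLoop none (c :: rest) = "latent" := by
      intro hdbl
      rcases hcases with hv | hl
      · exact absurd hdbl (hvalid.mp hv).2
      · exact hl
    simp only [poetic_line_status, poetic_line_status_alt, hcs, hset]
    rw [if_neg (show ¬(c :: rest = []) by simp)]
    by_cases hsp : (PySem.Chars.isspace c
        || PySem.Chars.isspace ((c :: rest).getLast (by simp))) = true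
    · rw [if_pos hsp]
      by_cases h1 : (['<', '>', ':', '"', '/', '\\', '|', '?', '*'].any
          fun y => PySem.Chars.isIn [y] (c :: rest)) = true
      · rw [if_pos h1]
      · rw [if_neg h1]
        by_cases h2 : ([['\''], [','], ['.'], [' ', ' ']].any
            fun t => PySem.Chars.isIn t (c :: rest)) = true
        · rw [if_pos h2]
        · rw [if_neg h2]
          by_cases h3 : c :: rest ≠ PySem.Chars.strip (c :: rest)
          · rw [if_pos h3]
          · -- A reaches the strip test with neither end whitespace claimed; contradict hsp
            exfalso
            rw [not_ne_iff] at h3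
            rcases hstrip.mp h3.symm with ⟨hc1, hc2⟩
            rw [Bool.or_eq_true] at hsp
            rcases hsp with h | h
            · rw [hc1] at h; exact absurd h (by decide)
            · rw [hc2] at h; exact absurd h (by decide)
    · rw [if_neg hsp]
      rw [Bool.or_eq_true, not_or, Bool.not_eq_true, Bool.not_eq_true] at hsp
      by_cases h1 : (['<', '>', ':', '"', '/', '\\', '|', '?', '*'].any
          fun y => PySem.Chars.isIn [y] (c :: rest)) = true
      · rw [if_pos h1]
        rw [List.any_eq_true] at h1
        rcases h1 with ⟨x, hxn, hxin⟩
        have hxL := (hsingle x _).mp hxin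
        refine (hlat_of_bad x hxL (Or.inl ?_)).symm
        exact List.elem_eq_true_of_mem (pvNineSubTwelve x hxn)
      · rw [if_neg h1]
        by_cases h2 : ([['\''], [','], ['.'], [' ', ' ']].any
            fun t => PySem.Chars.isIn t (c :: rest)) = true
        · rw [if_pos h2]
          rw [List.any_eq_true] at h2
          rcases h2 with ⟨t, htm, htin⟩
          have htm' : t = ['\''] ∨ t = [','] ∨ t = ['.'] ∨ t = [' ', ' '] := by
            simpa using htm
          rcases htm' with rfl | rfl | rfl | rfl
          · exact (hlat_of_bad _ ((hsingle _ _).mp htin) (Or.inl (by decide))).symm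
          · exact (hlat_of_bad _ ((hsingle _ _).mp htin) (Or.inl (by decide))).symm
          · exact (hlat_of_bad _ ((hsingle _ _).mp htin) (Or.inl (by decide))).symm
          · exact (hlat_of_dbl ((PySem.Chars.isIn_iff_infix _ _).mp htin)).symm
        · rw [if_neg h2]
          rw [if_neg (show ¬(c :: rest ≠ PySem.Chars.strip (c :: rest)) by
            rw [not_ne_iff]
            exact (hstrip.mpr ⟨hsp.1, hsp.2⟩).symm)]
          by_cases h4 : PySem.Chars.lower (c :: rest) ≠ c :: rest
          · rw [if_pos h4]
            have h4' : ¬ (∀ x ∈ c :: rest, PySem.Chars.lowerChar x = x) := by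
              intro hfix
              exact h4 (by simpa [PySem.Chars.lower] using pvMap_eq_self.mpr hfix)
            push Not at h4'
            rcases h4' with ⟨x, hxL, hxne⟩
            exact (hlat_of_bad x hxL (Or.inr hxne)).symm
          · rw [if_neg h4]
            rw [not_ne_iff] at h4
            -- everything clean on A's side: B's loop returns "valid"
            refine (hvalid.mpr ⟨?_, ?_⟩).symm
            · intro x hxL
              rw [Bool.or_eq_false_iff]
              constructor
              · by_contra hc
                rw [Bool.not_eq_false] at hc
                have hx12 : x ∈ (['<', '>', ':', '"', '/', '\\', '|', '?', '*', '\'', ',', '.'] : List Char) :=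
                  List.mem_of_elem_eq_true hc
                rcases pvTwelveSplit x hx12 with h | rfl | rfl | rfl
                · exact h1 (List.any_eq_true.mpr ⟨x, h, (hsingle x _).mpr hxL⟩)
                · exact h2 (List.any_eq_true.mpr ⟨['\''], by simp, (hsingle _ _).mpr hxL⟩)
                · exact h2 (List.any_eq_true.mpr ⟨[','], by simp, (hsingle _ _).mpr hxL⟩)
                · exact h2 (List.any_eq_true.mpr ⟨['.'], by simp, (hsingle _ _).mpr hxL⟩)
              · rw [bne_eq_false_iff_eq]
                have := pvMap_eq_self.mp (show List.map PySem.Chars.lowerChar (c :: rest) = c :: rest by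
                  simpa [PySem.Chars.lower] using h4)
                exact (this x hxL).symm
            · intro hdbl
              exact h2 (List.any_eq_true.mpr ⟨[' ', ' '], by simp, (PySem.Chars.isIn_iff_infix _ _).mpr hdbl⟩)
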